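-- pv_equiv track=rewrite | github.com/WuKunhuan163/CLITools | tool/READ/logic/pdf.py | process_text_linebreaks
-- ===== SOURCE A (Python) =====
-- def process_text_linebreaks(text: str) -> str:
--     """Smartly merge lines to avoid fragmented sentences."""
--     if not text.strip():
--         return text
--
--     ending_punctuations = {'.', '!', '?', ':', ';', '。', '！', '？', '：', '；'}
--     lines = text.split('\n')
--     processed_lines = []
--     current_paragraph = []
--
--     for line in lines:
--         line = line.strip()
--         if not line:
--             if current_paragraph:
--                 processed_lines.append(' '.join(current_paragraph))
--                 current_paragraph = []
--             continue
--
--         current_paragraph.append(line)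
--         if line and line[-1] in ending_punctuations:
--             processed_lines.append(' '.join(current_paragraph))
--             current_paragraph = []
--
--     if current_paragraph:
--         processed_lines.append(' '.join(current_paragraph))
--
--     return '\n'.join(processed_lines)
-- ===== SOURCE B (Python) =====
-- def process_text_linebreaks(text: str) -> str:
--     """Smartly merge lines to avoid fragmented sentences."""
--     if not text.strip():
--         return text
--
--     ENDINGS = '.!?:;。！？：；'
--
--     # Pass 1: strip every line and partition into blocks separated by blank lines.
--     stripped = [ln.strip() for ln in text.split('\n')]
--     blocks = []
--     blk = []
--     for s in stripped:
--         if s: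
--             blk.append(s)
--         elif blk:
--             blocks.append(blk)
--             blk = []
--     if blk:
--         blocks.append(blk)
--
--     # Pass 2: merge each block into paragraphs at ending punctuation.
--     paragraphs = []
--     for blk in blocks:
--         buf = []
--         for s in blk:
--             buf.append(s)
--             if s[-1] in ENDINGS:
--                 paragraphs.append(' '.join(buf))
--                 buf = []
--         if buf:
--             paragraphs.append(' '.join(buf))
--
--     return '\n'.join(paragraphs)
-- ===== Notes on version B (the rewrite author's own statement) =====
-- stated objective: alternative
-- what changed: Replaces A's single interleaved loop carrying (processed_lines, current_paragraph) by a two-pass decomposition: strip all lines and partition them into blocks at blank lines, then merge each block independently into paragraphs at ending punctuation.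
import Mathlib
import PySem

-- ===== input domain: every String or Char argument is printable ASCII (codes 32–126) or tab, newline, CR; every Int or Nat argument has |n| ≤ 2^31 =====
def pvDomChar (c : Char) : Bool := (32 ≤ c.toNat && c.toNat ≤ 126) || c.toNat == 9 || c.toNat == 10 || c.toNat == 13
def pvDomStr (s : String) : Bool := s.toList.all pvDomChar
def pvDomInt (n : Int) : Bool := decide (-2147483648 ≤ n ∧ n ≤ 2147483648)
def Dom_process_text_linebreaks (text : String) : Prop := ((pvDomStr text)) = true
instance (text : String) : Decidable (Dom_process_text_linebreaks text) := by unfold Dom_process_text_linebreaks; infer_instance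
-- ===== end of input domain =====

-- B merges lines into paragraphs by a two-pass decomposition (strip all lines and partition into blocks at
-- blank lines, then merge each block) instead of A's single loop with interleaved state; same cost.
-- Lines are handled as List Char (PySem.Chars) with String.ofList at the boundary.

-- shared helper: Python "line and line[-1] in ending_punctuations" for a line (as List Char)
def pvEnds (s : List Char) : Bool :=
  s ≠ [] && (PySem.List.pyGet? s (-1)).any
    (fun c => c ∈ ['.', '!', '?', ':', ';', '。', '！', '？', '：', '；'])

-- ===== PORT A =====
-- A's for-loop over lines with state (processed_lines acc, current_paragraph cur), plus the final flush
def pvLoopA : List (List Char) → List (List Char) → List (List Char) → List (List Char)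
  | [], acc, cur => acc ++ (if cur = [] then [] else [PySem.Chars.join [' '] cur])
  | l :: rest, acc, cur =>
      let s := PySem.Chars.strip l
      if s = [] then
        if cur = [] then pvLoopA rest acc []
        else pvLoopA rest (acc ++ [PySem.Chars.join [' '] cur]) []
      else
        if pvEnds s then pvLoopA rest (acc ++ [PySem.Chars.join [' '] (cur ++ [s])]) []
        else pvLoopA rest acc (cur ++ [s])

def process_text_linebreaks (text : String) : String :=
  if PySem.Chars.strip text.toList = [] then text
  else String.ofList (PySem.Chars.join ['\n']
    (pvLoopA (PySem.Chars.splitOn text.toList ['\n']) [] []))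

-- ===== PORT B =====
-- pass 1: partition the stripped lines into blocks separated by blank lines (blk = block being collected)
def pvBlocks : List (List Char) → List (List Char) → List (List (List Char))
  | [], blk => if blk = [] then [] else [blk]
  | s :: rest, blk =>
      if s = [] then
        if blk = [] then pvBlocks rest [] else blk :: pvBlocks rest []
      else pvBlocks rest (blk ++ [s])

-- pass 2: merge one block into paragraphs, flushing at ending punctuation and at the block's end
def pvMergeBlock : List (List Char) → List (List Char) → List (List Char)
  | [], buf => if buf = [] then [] else [PySem.Chars.join [' '] buf]
  | s :: rest, buf =>
      if pvEnds s then PySem.Chars.join [' '] (buf ++ [s]) :: pvMergeBlock rest []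
      else pvMergeBlock rest (buf ++ [s])

def process_text_linebreaks_alt (text : String) : String :=
  if PySem.Chars.strip text.toList = [] then text
  else
    let stripped := (PySem.Chars.splitOn text.toList ['\n']).map PySem.Chars.strip
    String.ofList (PySem.Chars.join ['\n']
      ((pvBlocks stripped []).flatMap (fun b => pvMergeBlock b [])))

-- ===== PRECONDITION & SPEC =====
def Spec_process_text_linebreaks (text : String) (out : String) : Prop := out = process_text_linebreaks_alt text
instance (text : String) (out : String) : Decidable (Spec_process_text_linebreaks text out) := by unfold Spec_process_text_linebreaks; infer_instance

-- ===== CLAIM (what is proved, stated in full; the proofs are below) =====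
def Claim_equal_process_text_linebreaks : Prop := ∀ (text : String), Dom_process_text_linebreaks text → Spec_process_text_linebreaks text (process_text_linebreaks text)

-- ===== LEMMAS AND PROOFS =====

-- A's loop on an already-stripped list of lines
def pvLoopS : List (List Char) → List (List Char) → List (List Char) → List (List Char)
  | [], acc, cur => acc ++ (if cur = [] then [] else [PySem.Chars.join [' '] cur])
  | s :: rest, acc, cur =>
      if s = [] then
        if cur = [] then pvLoopS rest acc []
        else pvLoopS rest (acc ++ [PySem.Chars.join [' '] cur]) []
      else
        if pvEnds s then pvLoopS rest (acc ++ [PySem.Chars.join [' '] (cur ++ [s])]) []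
        else pvLoopS rest acc (cur ++ [s])

theorem pvLoopA_eq_loopS (ls : List (List Char)) (acc cur : List (List Char)) :
    pvLoopA ls acc cur = pvLoopS (ls.map PySem.Chars.strip) acc cur := by
  induction ls generalizing acc cur with
  | nil => rfl
  | cons l rest ih =>
      simp only [pvLoopA, pvLoopS, List.map_cons]
      split_ifs <;> apply ih

theorem pvLoopS_acc (ls : List (List Char)) (acc cur : List (List Char)) :
    pvLoopS ls acc cur = acc ++ pvLoopS ls [] cur := by
  induction ls generalizing acc cur with
  | nil => simp [pvLoopS]
  | cons s rest ih =>
      simp only [pvLoopS]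
      split_ifs with h1 h2 h3
      · exact ih acc []
      · rw [ih (acc ++ [PySem.Chars.join [' '] cur]) [],
            ih ([] ++ [PySem.Chars.join [' '] cur]) []]
        simp
      · rw [ih (acc ++ [PySem.Chars.join [' '] (cur ++ [s])]) [],
            ih ([] ++ [PySem.Chars.join [' '] (cur ++ [s])]) []]
        simp
      · exact ih acc (cur ++ [s])

-- state of the merge after a block prefix: (paragraphs emitted so far, leftover buffer)
def pvMS : List (List Char) → List (List Char) → List (List Char) × List (List Char)
  | [], buf => ([], buf)
  | s :: rest, buf =>
      if pvEnds s then
        (PySem.Chars.join [' '] (buf ++ [s]) :: (pvMS rest []).1, (pvMS rest []).2)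
      else pvMS rest (buf ++ [s])

theorem pvMergeBlock_eq_MS (blk buf : List (List Char)) :
    pvMergeBlock blk buf = (pvMS blk buf).1 ++
      (if (pvMS blk buf).2 = [] then [] else [PySem.Chars.join [' '] (pvMS blk buf).2]) := by
  induction blk generalizing buf with
  | nil => simp [pvMergeBlock, pvMS]
  | cons s rest ih =>
      by_cases h : pvEnds s = true
      · simp only [pvMergeBlock, pvMS, if_pos h]
        rw [ih []]
        simp
      · simp only [pvMergeBlock, pvMS, if_neg h]
        exact ih (buf ++ [s])

theorem pvMS_snoc (blk : List (List Char)) (buf : List (List Char)) (s : List Char) :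
    pvMS (blk ++ [s]) buf =
      if pvEnds s then
        ((pvMS blk buf).1 ++ [PySem.Chars.join [' '] ((pvMS blk buf).2 ++ [s])], [])
      else ((pvMS blk buf).1, (pvMS blk buf).2 ++ [s]) := by
  induction blk generalizing buf with
  | nil => by_cases h : pvEnds s = true <;> simp [pvMS, h]
  | cons t rest ih =>
      by_cases ht : pvEnds t = true
      · simp only [List.cons_append, pvMS, if_pos ht]
        rw [ih []]
        by_cases hs : pvEnds s = true <;> simp [hs]
      · simp only [List.cons_append, pvMS, if_neg ht]
        exact ih (buf ++ [t])

-- main invariant: A's loop resumed from the residual buffer of the open block blk equals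
-- B's partition-then-merge with blk as the block being collected
theorem pvMain (ss : List (List Char)) (blk : List (List Char)) :
    (pvMS blk []).1 ++ pvLoopS ss [] (pvMS blk []).2 =
      (pvBlocks ss blk).flatMap (fun b => pvMergeBlock b []) := by
  induction ss generalizing blk with
  | nil =>
      simp only [pvLoopS, pvBlocks, List.nil_append]
      by_cases h : blk = []
      · simp [h, pvMS]
      · rw [if_neg h]
        simp [pvMergeBlock_eq_MS]
  | cons s rest ih =>
      by_cases hs : s = []
      · subst hs
        by_cases hb : blk = []
        · subst hb
          have h := ih ([] : List (List Char))
          simp only [pvMS] at h ⊢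
          simp only [pvLoopS, pvBlocks, if_true]
          simpa using h
        · simp only [pvLoopS, pvBlocks, if_true, if_neg hb, List.flatMap_cons]
          rw [pvMergeBlock_eq_MS]
          have hrest := ih ([] : List (List Char))
          simp only [pvMS, List.nil_append] at hrest
          by_cases h2 : (pvMS blk []).2 = []
          · simp [h2, hrest]
          · rw [if_neg h2, if_neg h2, pvLoopS_acc]
            rw [← hrest]
            simp
      · by_cases he : pvEnds s = true
        · simp only [pvLoopS, pvBlocks, if_neg hs, if_pos he]
          rw [pvLoopS_acc]
          have h := ih (blk ++ [s])
          rw [pvMS_snoc, if_pos he] at h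
          simp only [List.nil_append] at h ⊢
          rw [← h]
          simp
        · simp only [pvLoopS, pvBlocks, if_neg hs, if_neg he]
          have h := ih (blk ++ [s])
          rw [pvMS_snoc, if_neg he] at h
          simpa using h

-- ===== VERDICT (by name: the statement is the Claim_ definition above) =====
theorem process_text_linebreaks_spec : Claim_equal_process_text_linebreaks := by
  intro text _
  unfold Spec_process_text_linebreaks process_text_linebreaks process_text_linebreaks_alt
  split_ifs with h
  · rfl
  · have h0 := pvMain ((PySem.Chars.splitOn text.toList ['\n']).map PySem.Chars.strip) []
    simp only [pvMS, List.nil_append] at h0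
    rw [pvLoopA_eq_loopS, h0]
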